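-- pv_equiv track=rewrite | github.com/jacobbox/CVprojects | 3- Barnabys brewhouse/brewing.py | sanitize_input_csv
-- ===== SOURCE A (Python) =====
-- from typing import Tuple, List, Union
--
-- def sanitize_input_csv(csv_line_list: List[str]) -> List[str]:
--     """helper: Takes in a csv file that has just been .readlines()'ed and removes , form entries
--
--     iterates through every line of the given csv file marking its state as inside/outside
--     quotes as it meets them.  if it is inside quotes and hits a comma then replace it with
--     a semi colon.
--
--     Arguments:
--         csv_line_list: A list of strings representing a csv file
--
--     Returns:
--         The same list of strings form the input except now entries do not contain commas
--     """
--     safe_lines = []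
--     for line in csv_line_list:
--         if not line.count(",") == 5:
--             index = 0
--             in_quotes = False
--             safe_line = ""
--             while index < len(line):
--                 if line[index] == "," and in_quotes:#if the ',' should be escaped
--                     safe_line += ";"
--                 else:#normal chars and unescaped ','
--                     safe_line += line[index]
--                 if line[index] == '"':#if we need to start or stop escaping
--                     if in_quotes:#toggle quotes or not
--                         in_quotes = False
--                     else:
--                         in_quotes = True
--                 index += 1
--             line = safe_line
--         safe_lines.append(line)
--     return safe_lines
-- ===== SOURCE B (Python) =====
-- from typing import List
--
-- def sanitize_input_csv(csv_line_list: List[str]) -> List[str]: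
--     """Same as A, but via split-on-quote: odd-indexed segments of line.split('"')
--     are exactly the inside-quotes runs, so commas are replaced there in bulk."""
--     return [
--         line if line.count(",") == 5 else
--         '"'.join(part.replace(",", ";") if i % 2 == 1 else part
--                  for i, part in enumerate(line.split('"')))
--         for line in csv_line_list
--     ]
-- ===== Notes on version B (the rewrite author's own statement) =====
-- stated objective: simpler
-- what changed: Replaces A's char-by-char in_quotes state machine with a single split-on-'"' / bulk str.replace on odd-indexed (inside-quote) segments / rejoin, expressed as a list comprehension; the exact count(',')==5 pass-through guard is kept.
import Mathlib
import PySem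

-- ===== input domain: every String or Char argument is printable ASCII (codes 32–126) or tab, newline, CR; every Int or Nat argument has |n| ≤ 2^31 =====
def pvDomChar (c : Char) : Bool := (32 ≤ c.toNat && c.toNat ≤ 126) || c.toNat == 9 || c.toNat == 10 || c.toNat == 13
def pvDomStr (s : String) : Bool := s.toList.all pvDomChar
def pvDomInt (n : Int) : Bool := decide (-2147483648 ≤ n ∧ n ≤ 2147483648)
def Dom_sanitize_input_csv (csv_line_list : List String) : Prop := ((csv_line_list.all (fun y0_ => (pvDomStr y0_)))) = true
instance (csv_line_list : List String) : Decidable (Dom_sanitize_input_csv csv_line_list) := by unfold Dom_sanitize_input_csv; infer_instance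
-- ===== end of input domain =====

-- B replaces A's char-by-char in_quotes state machine with split-on-'"' / replace commas
-- in odd-indexed (inside-quote) segments / rejoin (objective: simpler).

-- ===== PORT A =====
-- the 'while index < len(line)' loop of A: state (in_quotes, safe_line), one char per step
def pvALoop : List Char → Bool → List Char → List Char
  | [], _, safe_line => safe_line
  | c :: rest, in_quotes, safe_line =>
      pvALoop rest
        (if c = '"' then (if in_quotes = true then false else true) else in_quotes)
        (safe_line ++ [if c = ',' ∧ in_quotes = true then ';' else c])

def sanitize_input_csv (csv_line_list : List String) : List String :=
  csv_line_list.foldl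
    (fun safe_lines line =>
      let line' :=
        if ¬ (PySem.Str.count line "," = 5) then
          String.ofList (pvALoop line.toList false [])
        else line
      safe_lines ++ [line'])
    []

-- ===== PORT B =====
-- 'part.replace(",", ";") if i % 2 == 1 else part' for (i, part) of enumerate(line.split('"'))
def pvFixPart (p : Int × List Char) : List Char :=
  if p.1 % 2 = 1 then PySem.Chars.replace p.2 [','] [';'] else p.2

def sanitize_input_csv_alt (csv_line_list : List String) : List String :=
  csv_line_list.map (fun line =>
    if PySem.Str.count line "," = 5 then line
    else
      String.ofList (PySem.Chars.join ['"']
        ((PySem.List.enumerate (PySem.Chars.splitOn line.toList ['"'])).map pvFixPart)))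

-- ===== PRECONDITION & SPEC =====
def Spec_sanitize_input_csv (csv_line_list : List String) (out : List String) : Prop := out = sanitize_input_csv_alt csv_line_list
instance (csv_line_list : List String) (out : List String) : Decidable (Spec_sanitize_input_csv csv_line_list out) := by unfold Spec_sanitize_input_csv; infer_instance

-- ===== CLAIM (what is proved, stated in full; the proofs are below) =====
def Claim_equal_sanitize_input_csv : Prop := ∀ (csv_line_list : List String), Dom_sanitize_input_csv csv_line_list → Spec_sanitize_input_csv csv_line_list (sanitize_input_csv csv_line_list)

-- ===== LEMMAS AND PROOFS =====

-- spec-level split of a char list on '"'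
def splitC : List Char → List (List Char)
  | [] => [[]]
  | c :: rest => if c = '"' then [] :: splitC rest else (splitC rest).modifyHead (c :: ·)

-- spec-level form of A's machine (no accumulator)
def bodyC : List Char → Bool → List Char
  | [], _ => []
  | c :: rest, q =>
      (if c = ',' ∧ q = true then ';' else c) ::
        bodyC rest (if c = '"' then (if q = true then false else true) else q)

def rComma (c : Char) : Char := if c = ',' then ';' else c

-- spec-level form of B: replace commas in alternating segments, starting per q
def mapPar : Bool → List (List Char) → List (List Char)
  | _, [] => []
  | q, p :: ps => (if q then p.map rComma else p) :: mapPar (!q) ps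

theorem splitC_quote (rest : List Char) : splitC ('"' :: rest) = [] :: splitC rest := by
  simp [splitC]

theorem splitC_other (c : Char) (rest : List Char) (hc : c ≠ '"') :
    splitC (c :: rest) = (splitC rest).modifyHead (c :: ·) := by
  simp [splitC, hc]

theorem pvALoop_eq (cs : List Char) : ∀ (q : Bool) (safe : List Char),
    pvALoop cs q safe = safe ++ bodyC cs q := by
  induction cs with
  | nil => intro q safe; simp [pvALoop, bodyC]
  | cons c rest ih => intro q safe; simp [pvALoop, bodyC, ih]

theorem splitC_ne_nil : ∀ (cs : List Char), splitC cs ≠ [] := by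
  intro cs
  induction cs with
  | nil => simp [splitC]
  | cons c rest ih =>
    simp only [splitC]
    split
    · simp
    · cases h : splitC rest with
      | nil => exact absurd h ih
      | cons a b => simp

theorem splitC_cons_exists (cs : List Char) : ∃ p ps, splitC cs = p :: ps := by
  cases h : splitC cs with
  | nil => exact absurd h (splitC_ne_nil cs)
  | cons a b => exact ⟨a, b, rfl⟩

theorem splitOn_go_zero (l cur : List Char) (acc : List (List Char)) :
    PySem.Chars.splitOn.go ['"'] 0 l cur acc = ((cur.reverse ++ l) :: acc).reverse := rfl

theorem splitOn_go_nil (f : Nat) (cur : List Char) (acc : List (List Char)) :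
    PySem.Chars.splitOn.go ['"'] (f + 1) [] cur acc = (cur.reverse :: acc).reverse := rfl

theorem splitOn_go_cons (f : Nat) (c : Char) (rest cur : List Char) (acc : List (List Char)) :
    PySem.Chars.splitOn.go ['"'] (f + 1) (c :: rest) cur acc
      = if c = '"' then PySem.Chars.splitOn.go ['"'] f rest [] (cur.reverse :: acc)
        else PySem.Chars.splitOn.go ['"'] f rest (c :: cur) acc := by
  rw [PySem.Chars.splitOn.go.eq_def]
  by_cases hc : c = '"'
  · simp [hc, List.isPrefixOf]
  · simp [hc, List.isPrefixOf, Ne.symm hc]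

theorem splitOn_go_singleton (fuel : Nat) : ∀ (l cur : List Char) (acc : List (List Char)),
    l.length ≤ fuel →
    PySem.Chars.splitOn.go ['"'] fuel l cur acc
      = acc.reverse ++ (splitC l).modifyHead (cur.reverse ++ ·) := by
  induction fuel with
  | zero =>
    intro l cur acc h
    have hl : l = [] := by cases l <;> simp at h ⊢
    subst hl
    rw [splitOn_go_zero]
    simp [splitC]
  | succ f ih =>
    intro l cur acc h
    cases l with
    | nil =>
      rw [splitOn_go_nil]
      simp [splitC]
    | cons c rest =>
      simp only [List.length_cons] at h
      rw [splitOn_go_cons]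
      by_cases hc : c = '"'
      · subst hc
        rw [if_pos rfl, ih rest [] _ (by omega), splitC_quote]
        obtain ⟨p, ps, hps⟩ := splitC_cons_exists rest
        simp [hps]
      · rw [if_neg hc, ih rest (c :: cur) acc (by omega), splitC_other c rest hc]
        obtain ⟨p, ps, hps⟩ := splitC_cons_exists rest
        simp [hps]

theorem splitOn_singleton (cs : List Char) :
    PySem.Chars.splitOn cs ['"'] = splitC cs := by
  unfold PySem.Chars.splitOn
  rw [splitOn_go_singleton (cs.length + 1) cs [] [] (by omega)]
  obtain ⟨p, ps, hps⟩ := splitC_cons_exists cs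
  simp [hps]

theorem replace_go_zero (l acc : List Char) :
    PySem.Chars.replace.go [','] [';'] 0 l acc = acc.reverse ++ l := rfl

theorem replace_go_nil (f : Nat) (acc : List Char) :
    PySem.Chars.replace.go [','] [';'] (f + 1) [] acc = acc.reverse := rfl

theorem replace_go_cons (f : Nat) (c : Char) (t acc : List Char) :
    PySem.Chars.replace.go [','] [';'] (f + 1) (c :: t) acc
      = if c = ',' then PySem.Chars.replace.go [','] [';'] f t (';' :: acc)
        else PySem.Chars.replace.go [','] [';'] f t (c :: acc) := by
  rw [PySem.Chars.replace.go.eq_def]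
  by_cases hc : c = ','
  · simp [hc, List.isPrefixOf]
  · simp [hc, List.isPrefixOf, Ne.symm hc]

theorem replace_go_comma (fuel : Nat) : ∀ (l acc : List Char),
    l.length ≤ fuel →
    PySem.Chars.replace.go [','] [';'] fuel l acc = acc.reverse ++ l.map rComma := by
  induction fuel with
  | zero =>
    intro l acc h
    have hl : l = [] := by cases l <;> simp at h ⊢
    subst hl
    rw [replace_go_zero]
    simp
  | succ f ih =>
    intro l acc h
    cases l with
    | nil => rw [replace_go_nil]; simp
    | cons c t =>
      simp only [List.length_cons] at h
      rw [replace_go_cons]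
      by_cases hc : c = ','
      · subst hc
        rw [if_pos rfl, ih t _ (by omega)]
        simp [rComma]
      · rw [if_neg hc, ih t (c :: acc) (by omega)]
        simp [rComma, hc]

theorem replace_comma (cs : List Char) :
    PySem.Chars.replace cs [','] [';'] = cs.map rComma := by
  unfold PySem.Chars.replace
  simp only [List.isEmpty_cons, Bool.false_eq_true, if_false]
  exact replace_go_comma cs.length cs [] (le_refl _)

-- join after an (o :: w) head pulls o out front
theorem join_cons_head (o : Char) (w : List Char) (t : List (List Char)) :
    PySem.Chars.join ['"'] ((o :: w) :: t) = o :: PySem.Chars.join ['"'] (w :: t) := by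
  cases t with
  | nil => simp [PySem.Chars.join_singleton]
  | cons y ys => simp [PySem.Chars.join_cons_cons]

theorem main_line (cs : List Char) : ∀ (q : Bool),
    PySem.Chars.join ['"'] (mapPar q (splitC cs)) = bodyC cs q := by
  induction cs with
  | nil =>
    intro q
    simp only [splitC, mapPar, bodyC]
    cases q <;> simp [PySem.Chars.join_singleton]
  | cons c rest ih =>
    intro q
    obtain ⟨p, ps, hps⟩ := splitC_cons_exists rest
    by_cases hc : c = '"'
    · subst hc
      rw [splitC_quote, hps]
      rw [show mapPar q ([] :: p :: ps) = [] :: mapPar (!q) (p :: ps) from by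
        cases q <;> simp [mapPar]]
      rw [show mapPar (!q) (p :: ps)
            = (if (!q) then p.map rComma else p) :: mapPar (!(!q)) ps from rfl]
      rw [PySem.Chars.join_cons_cons]
      rw [show bodyC ('"' :: rest) q
            = '"' :: bodyC rest (if q = true then false else true) from by simp [bodyC]]
      have hq : (if q = true then false else true) = !q := by cases q <;> rfl
      rw [hq, ← ih (!q), hps]
      rw [show mapPar (!q) (p :: ps)
            = (if (!q) then p.map rComma else p) :: mapPar (!(!q)) ps from rfl]
      simp
    · rw [splitC_other c rest hc, hps, List.modifyHead_cons]
      rw [show mapPar q ((c :: p) :: ps)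
            = (if q then (c :: p).map rComma else c :: p) :: mapPar (!q) ps from rfl]
      have hsplit : (if q then (c :: p).map rComma else c :: p)
          = (if c = ',' ∧ q = true then ';' else c) :: (if q then p.map rComma else p) := by
        cases q with
        | false => simp
        | true =>
          simp only [if_true, List.map_cons, rComma]
          by_cases h2 : c = ',' <;> simp [h2]
      rw [hsplit, join_cons_head]
      rw [show bodyC (c :: rest) q
            = (if c = ',' ∧ q = true then ';' else c) :: bodyC rest q from by
        simp [bodyC, hc]]
      rw [← ih q, hps]
      rw [show mapPar q (p :: ps)
            = (if q then p.map rComma else p) :: mapPar (!q) ps from rfl]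

theorem enum_map (parts : List (List Char)) : ∀ (n : Nat),
    (PySem.List.enumerate parts (n : Int)).map pvFixPart = mapPar (n % 2 == 1) parts := by
  induction parts with
  | nil => intro n; simp [PySem.List.enumerate, mapPar]
  | cons p ps ih =>
    intro n
    rw [show PySem.List.enumerate (p :: ps) (n : Int)
          = ((n : Int), p) :: PySem.List.enumerate ps ((n : Int) + 1) from rfl]
    rw [show ((n : Int) + 1) = ((n + 1 : Nat) : Int) from by push_cast; ring]
    simp only [List.map_cons, ih (n + 1)]
    rw [show mapPar (n % 2 == 1) (p :: ps)
          = (if (n % 2 == 1) then p.map rComma else p) :: mapPar (!(n % 2 == 1)) ps from rfl]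
    congr 1
    · simp only [pvFixPart, replace_comma]
      have hmod : ((n : Int) % 2 = 1) ↔ (n % 2 = 1) := by omega
      by_cases h : n % 2 = 1
      · simp [hmod.mpr h, h]
      · rw [if_neg (fun hh => h (hmod.mp hh)), if_neg (by simpa using h)]
    · congr 1
      rcases Nat.mod_two_eq_zero_or_one n with h | h <;> simp [Nat.add_mod, h]

theorem line_eq (line : String) :
    String.ofList (pvALoop line.toList false [])
      = String.ofList (PySem.Chars.join ['"']
          ((PySem.List.enumerate (PySem.Chars.splitOn line.toList ['"'])).map pvFixPart)) := by
  rw [splitOn_singleton]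
  rw [show ((0 : Int)) = ((0 : Nat) : Int) from rfl, enum_map]
  rw [show ((0 : Nat) % 2 == 1) = false from rfl]
  rw [main_line, pvALoop_eq]
  simp

-- ===== VERDICT (by name: the statement is the Claim_ definition above) =====
theorem sanitize_input_csv_spec : Claim_equal_sanitize_input_csv := by
  intro csv_line_list _
  unfold Spec_sanitize_input_csv sanitize_input_csv sanitize_input_csv_alt
  rw [PySem.List.foldl_append_singleton_eq_map]
  apply List.map_congr_left
  intro line _
  by_cases h : PySem.Str.count line "," = 5
  · rw [if_neg (not_not_intro h), if_pos h]
  · rw [if_pos h, if_neg h]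
    exact line_eq line
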